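-- pv_equiv track=rewrite | github.com/charliemeyer/yahtzee-cli | strategies/scores.py | three_of_kind
-- ===== SOURCE A (Python) =====
-- def three_of_kind(roll):
--     freqs = {}
--     for d in roll:
--         if d in freqs:
--             freqs[d] += 1
--         else:
--             freqs[d] = 1
--     for d in freqs:
--         if freqs[d] >= 3:
--             return sum(roll)
--     return 0
-- ===== SOURCE B (Python) =====
-- def three_of_kind(roll):
--     s = sorted(roll)
--     run = 1
--     for prev, cur in zip(s, s[1:]):
--         run = run + 1 if cur == prev else 1
--         if run == 3:
--             return sum(roll)
--     return 0
-- ===== Notes on version B (the rewrite author's own statement) =====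
-- stated objective: alternative
-- what changed: B detects a three-of-a-kind by sorting a copy of the roll and scanning it once with a run-length counter for three equal adjacent values, instead of building a frequency dictionary and scanning its entries.
import Mathlib
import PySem

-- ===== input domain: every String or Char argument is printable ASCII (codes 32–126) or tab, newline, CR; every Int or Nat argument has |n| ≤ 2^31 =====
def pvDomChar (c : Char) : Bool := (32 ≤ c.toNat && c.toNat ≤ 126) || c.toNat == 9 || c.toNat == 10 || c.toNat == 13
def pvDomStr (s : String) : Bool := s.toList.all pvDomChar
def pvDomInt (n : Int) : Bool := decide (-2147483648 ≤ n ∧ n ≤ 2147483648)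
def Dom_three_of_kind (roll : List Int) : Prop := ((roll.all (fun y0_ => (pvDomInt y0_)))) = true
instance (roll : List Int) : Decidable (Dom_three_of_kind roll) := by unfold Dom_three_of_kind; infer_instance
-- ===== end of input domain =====

-- B detects a three-of-a-kind by sorting a copy and scanning for a run of three equal
-- adjacent values, instead of A's frequency dictionary (alternative decomposition).


-- ===== PORT A =====
-- second loop of A: 'for d in freqs: if freqs[d] >= 3: return sum(roll)'; 'freqs[d]' is
-- ported as 'getD d 0', exact because every iterated d is a key of freqs.
def three_of_kind_find (freqs : PySem.Dict Int Int) (roll : List Int) : List Int → Int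
  | [] => 0
  | d :: ds => if 3 ≤ freqs.getD d 0 then roll.sum else three_of_kind_find freqs roll ds

def three_of_kind (roll : List Int) : Int :=
  let freqs := roll.foldl
    (fun f d => if f.contains d then f.insert d (f.getD d 0 + 1) else f.insert d 1)
    PySem.Dict.empty
  three_of_kind_find freqs roll freqs.keys

-- ===== PORT B =====
-- the 'for prev, cur in zip(s, s[1:])' loop of Source B, carrying prev and run
def three_of_kind_scan (roll : List Int) (prev : Int) (run : Int) : List Int → Int
  | [] => 0
  | cur :: t =>
      let run' := if cur = prev then run + 1 else 1
      if run' = 3 then roll.sum else three_of_kind_scan roll cur run' t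

def three_of_kind_alt (roll : List Int) : Int :=
  match PySem.List.sorted roll (fun x => x) false with
  | [] => 0
  | p :: rest => three_of_kind_scan roll p 1 rest

-- ===== PRECONDITION & SPEC =====
def Spec_three_of_kind (roll : List Int) (out : Int) : Prop := out = three_of_kind_alt roll
instance (roll : List Int) (out : Int) : Decidable (Spec_three_of_kind roll out) := by unfold Spec_three_of_kind; infer_instance

-- ===== CLAIM (what is proved, stated in full; the proofs are below) =====
def Claim_equal_three_of_kind : Prop := ∀ (roll : List Int), Dom_three_of_kind roll → Spec_three_of_kind roll (three_of_kind roll)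

-- ===== LEMMAS AND PROOFS =====

-- A's second loop returns sum(roll) iff some visited key has count ≥ 3 in roll
lemma find_counter_eq (roll ks : List Int) :
    three_of_kind_find (PySem.Dict.counter roll) roll ks =
      if ∃ d ∈ ks, 3 ≤ roll.count d then roll.sum else 0 := by
  induction ks with
  | nil => simp [three_of_kind_find]
  | cons d ds ih =>
      simp only [three_of_kind_find, PySem.Dict.getD_counter, ih]
      by_cases h : 3 ≤ roll.count d
      · have h' : (3 : Int) ≤ (roll.count d : Int) := by exact_mod_cast h
        simp [h', h]
      · have h' : ¬ (3 : Int) ≤ (roll.count d : Int) := by exact_mod_cast h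
        rw [if_neg h']
        congr 1
        simp only [eq_iff_iff]
        constructor
        · rintro ⟨x, hx, hcx⟩; exact ⟨x, List.mem_cons_of_mem _ hx, hcx⟩
        · rintro ⟨x, hx, hcx⟩
          rcases List.mem_cons.mp hx with rfl | hx
          · exact absurd hcx h
          · exact ⟨x, hx, hcx⟩

-- A's characterisation
lemma three_of_kind_eq (roll : List Int) :
    three_of_kind roll = if ∃ d ∈ roll, 3 ≤ roll.count d then roll.sum else 0 := by
  have hstep :
      (fun (f : PySem.Dict Int Int) (d : Int) =>
          if f.contains d then f.insert d (f.getD d 0 + 1) else f.insert d 1) =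
      (fun (f : PySem.Dict Int Int) (d : Int) => f.insert d (f.getD d 0 + 1)) := by
    funext f d
    cases hc : f.contains d with
    | true => simp
    | false =>
        rw [PySem.Dict.getD_of_not_contains f 0 hc]
        simp
  show three_of_kind_find _ roll _ = _
  rw [show (roll.foldl
        (fun f d => if f.contains d then f.insert d (f.getD d 0 + 1) else f.insert d 1)
        PySem.Dict.empty) = PySem.Dict.counter roll by
      rw [hstep]; exact PySem.Dict.foldl_insert_getD_add_one_eq_counter roll]
  rw [find_counter_eq]
  congr 1
  simp only [PySem.Dict.keys_counter, eq_iff_iff]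
  constructor
  · rintro ⟨d, hd, hc⟩; exact ⟨d, (PySem.Set.mem_ofList _ _).mp hd, hc⟩
  · rintro ⟨d, hd, hc⟩; exact ⟨d, (PySem.Set.mem_ofList _ _).mpr hd, hc⟩

-- B's scan invariant on a sorted suffix: `run` copies of `prev` were just consumed, so the
-- scan returns sum(roll) iff the run of `prev` reaches 3 or some later value occurs ≥ 3 times.
lemma scan_eq (roll : List Int) (rest : List Int) :
    ∀ (prev run : Int), (run = 1 ∨ run = 2) →
      List.Pairwise (· ≤ ·) (prev :: rest) →
      three_of_kind_scan roll prev run rest =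
        (if (3 ≤ run + (rest.count prev : Int) ∨ ∃ x ∈ rest, x ≠ prev ∧ 3 ≤ rest.count x)
          then roll.sum else 0) := by
  induction rest with
  | nil =>
      intro prev run hrun _
      have hno : ¬ (3 ≤ run + (([] : List Int).count prev : Int) ∨
          ∃ x ∈ ([] : List Int), x ≠ prev ∧ 3 ≤ ([] : List Int).count x) := by
        rintro (h | ⟨x, hx, -⟩)
        · simp only [List.count_nil, Nat.cast_zero, add_zero] at h
          rcases hrun with rfl | rfl <;> omega
        · exact absurd hx (List.not_mem_nil)
      simp only [three_of_kind_scan]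
      rw [if_neg hno]
  | cons a t ih =>
      intro prev run hrun hs
      have hpa : prev ≤ a := (List.pairwise_cons.mp hs).1 a (List.mem_cons_self)
      have hst : List.Pairwise (· ≤ ·) (a :: t) := (List.pairwise_cons.mp hs).2
      by_cases hap : a = prev
      · subst hap
        rcases hrun with rfl | rfl
        · -- run = 1 → run' = 2, recurse
          have h2 : three_of_kind_scan roll a 1 (a :: t) = three_of_kind_scan roll a 2 t := by
            simp [three_of_kind_scan]
          rw [h2, ih a 2 (Or.inr rfl) hst]
          congr 1
          simp only [eq_iff_iff, List.count_cons_self]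
          constructor
          · rintro (h | ⟨x, hx, hxa, hcx⟩)
            · left; push_cast at h ⊢; omega
            · exact Or.inr ⟨x, List.mem_cons_of_mem _ hx, hxa,
                by rwa [List.count_cons_of_ne (Ne.symm hxa)]⟩
          · rintro (h | ⟨x, hx, hxa, hcx⟩)
            · left; push_cast at h ⊢; omega
            · rcases List.mem_cons.mp hx with rfl | hx
              · exact absurd rfl hxa
              · exact Or.inr ⟨x, hx, hxa, by rwa [List.count_cons_of_ne (Ne.symm hxa)] at hcx⟩
        · -- run = 2 → run' = 3, return sum
          have h3 : three_of_kind_scan roll a 2 (a :: t) = roll.sum := by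
            simp [three_of_kind_scan]
          rw [h3]
          have : 3 ≤ (2 : Int) + (((a :: t).count a : Nat) : Int) := by
            simp only [List.count_cons_self]; push_cast; omega
          rw [if_pos (Or.inl this)]
      · -- new value: run resets to 1
        have hlt : prev < a := lt_of_le_of_ne hpa (fun h => hap h.symm)
        have hnot : prev ∉ a :: t := by
          intro hmem
          rcases List.mem_cons.mp hmem with rfl | hmem
          · exact absurd rfl hap
          · exact absurd ((List.pairwise_cons.mp hst).1 prev hmem) (not_le.mpr hlt)
        have hc0 : (a :: t).count prev = 0 := List.count_eq_zero_of_not_mem hnot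
        have h1 : three_of_kind_scan roll prev run (a :: t) = three_of_kind_scan roll a 1 t := by
          rcases hrun with rfl | rfl <;> simp [three_of_kind_scan, hap]
        rw [h1, ih a 1 (Or.inl rfl) hst]
        congr 1
        simp only [eq_iff_iff]
        constructor
        · rintro (h | ⟨x, hx, hxa, hcx⟩)
          · right
            refine ⟨a, List.mem_cons_self, fun h' => hap h', ?_⟩
            simp only [List.count_cons_self]; omega
          · right
            refine ⟨x, List.mem_cons_of_mem _ hx, ?_, ?_⟩
            · rintro rfl; exact hnot (List.mem_cons_of_mem _ hx)
            · rw [List.count_cons_of_ne (Ne.symm hxa)]; omega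
        · rintro (h | ⟨x, hx, hxp, hcx⟩)
          · exfalso
            rw [hc0] at h
            rcases hrun with rfl | rfl <;> simp at h
          · by_cases hxa : x = a
            · subst hxa
              left
              simp only [List.count_cons_self] at hcx
              omega
            · right
              rcases List.mem_cons.mp hx with rfl | hx
              · exact absurd rfl hxa
              · exact ⟨x, hx, hxa, by rwa [List.count_cons_of_ne (Ne.symm hxa)] at hcx⟩

-- B's characterisation
lemma three_of_kind_alt_eq (roll : List Int) :
    three_of_kind_alt roll = if ∃ d ∈ roll, 3 ≤ roll.count d then roll.sum else 0 := by
  unfold three_of_kind_alt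
  have hperm : (PySem.List.sorted roll (fun x => x) false).Perm roll :=
    PySem.List.sorted_perm roll (fun x => x) false
  have hpair : List.Pairwise (· ≤ ·) (PySem.List.sorted roll (fun x => x) false) := by
    simpa using PySem.List.sorted_pairwise roll (fun x => x)
  cases hcase : PySem.List.sorted roll (fun x => x) false with
  | nil =>
      have : roll = [] := (hcase ▸ hperm).symm.eq_nil
      simp [this]
  | cons p rest =>
      rw [hcase] at hperm hpair
      show three_of_kind_scan roll p 1 rest = _
      rw [scan_eq roll rest p 1 (Or.inl rfl) hpair]
      congr 1
      simp only [eq_iff_iff]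
      have hco : ∀ x, (p :: rest).count x = roll.count x := fun x => hperm.count_eq x
      constructor
      · rintro (h | ⟨x, hx, hxp, hcx⟩)
        · refine ⟨p, hperm.mem_iff.mp List.mem_cons_self, ?_⟩
          rw [← hco p]; simp only [List.count_cons_self]; omega
        · refine ⟨x, hperm.mem_iff.mp (List.mem_cons_of_mem _ hx), ?_⟩
          rw [← hco x, List.count_cons_of_ne (Ne.symm hxp)]; exact hcx
      · rintro ⟨x, hx, hcx⟩
        rw [← hco x] at hcx
        by_cases hxp : x = p
        · subst hxp
          left
          simp only [List.count_cons_self] at hcx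
          omega
        · right
          rcases List.mem_cons.mp (hperm.mem_iff.mpr hx) with rfl | hx'
          · exact absurd rfl hxp
          · exact ⟨x, hx', hxp, by rwa [List.count_cons_of_ne (Ne.symm hxp)] at hcx⟩

-- ===== VERDICT (by name: the statement is the Claim_ definition above) =====
theorem three_of_kind_spec : Claim_equal_three_of_kind := by
  intro roll _
  show three_of_kind roll = three_of_kind_alt roll
  rw [three_of_kind_eq, three_of_kind_alt_eq]
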